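-- pv_equiv track=rewrite | github.com/darianrosebrook/distill | data/wrappers/curriculum.py | _extract_cot_steps
-- ===== SOURCE A (Python) =====
-- from typing import Dict, Any, List
--
-- def _extract_cot_steps(text: str) -> List[str]:
--     """
--     Extract CoT steps from text.
--
--     Simple heuristic: split by common CoT markers.
--     Can be improved with more sophisticated parsing.
--     """
--     # Common CoT markers
--     markers = ["Step", "Step:", "1.", "2.", "3.", "First", "Then", "Finally"]
--     steps = []
--     lines = text.split("\n")
--     current_step = []
--
--     for line in lines:
--         line = line.strip()
--         if not line:
--             if current_step:
--                 steps.append(" ".join(current_step))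
--                 current_step = []
--             continue
--
--         # Check if line starts a new step
--         is_new_step = any(line.startswith(marker) for marker in markers)
--         if is_new_step and current_step:
--             steps.append(" ".join(current_step))
--             current_step = [line]
--         else:
--             current_step.append(line)
--
--     if current_step:
--         steps.append(" ".join(current_step))
--
--     return steps if steps else [text]
-- ===== SOURCE B (Python) =====
-- from typing import List
--
-- def _extract_cot_steps(text: str) -> List[str]:
--     markers = ["Step", "Step:", "1.", "2.", "3.", "First", "Then", "Finally"]
--     lines = [ln.strip() for ln in text.split("\n")]
--     n = len(lines)
--     steps: List[str] = []
--     i = 0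
--     while i < n:
--         if not lines[i]:
--             i += 1
--             continue
--         j = i + 1
--         while j < n and lines[j] and not any(lines[j].startswith(m) for m in markers):
--             j += 1
--         steps.append(" ".join(lines[i:j]))
--         i = j
--     return steps if steps else [text]
-- ===== Notes on version B (the rewrite author's own statement) =====
-- stated objective: alternative
-- what changed: A's single accumulator fold that flushes current_step on blanks and markers is replaced by a two-pointer scan over the pre-stripped line list: each step is taken as one contiguous segment (a nonempty line plus the following nonempty non-marker lines) and joined at once.
import Mathlib
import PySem

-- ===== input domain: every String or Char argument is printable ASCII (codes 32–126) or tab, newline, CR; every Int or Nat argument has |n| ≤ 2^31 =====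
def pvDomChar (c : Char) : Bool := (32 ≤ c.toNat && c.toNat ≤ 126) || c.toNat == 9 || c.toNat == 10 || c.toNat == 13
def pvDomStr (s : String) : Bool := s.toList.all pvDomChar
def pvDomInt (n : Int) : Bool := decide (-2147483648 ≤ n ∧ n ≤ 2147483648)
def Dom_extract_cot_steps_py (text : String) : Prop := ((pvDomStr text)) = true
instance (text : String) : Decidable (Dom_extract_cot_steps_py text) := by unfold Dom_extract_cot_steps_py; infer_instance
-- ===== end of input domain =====

-- B replaces A's flush-on-the-fly accumulator fold by a two-pointer segment scan over pre-stripped lines (alternative decomposition, same cost).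


-- ===== PORT A =====
def pvMarkers : List String := ["Step", "Step:", "1.", "2.", "3.", "First", "Then", "Finally"]

def pvIsNewStep (line : String) : Bool := pvMarkers.any (fun m => PySem.Str.startswith line m)

-- text.split("\n"): sep is the nonempty literal "\n", so split? is always `some`
def pvSplitNL (text : String) : List String := (PySem.Str.split? text "\n").getD []

def pvStepA (acc : List String × List String) (line0 : String) : List String × List String :=
  let line := PySem.Str.strip line0
  if line = "" then
    (if acc.2 ≠ [] then (acc.1 ++ [PySem.Str.join " " acc.2], []) else acc)
  else if pvIsNewStep line ∧ acc.2 ≠ [] then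
    (acc.1 ++ [PySem.Str.join " " acc.2], [line])
  else (acc.1, acc.2 ++ [line])

def extract_cot_steps_py (text : String) : List String :=
  let lines := pvSplitNL text
  let acc := lines.foldl pvStepA ([], [])
  let steps := if acc.2 ≠ [] then acc.1 ++ [PySem.Str.join " " acc.2] else acc.1
  if steps ≠ [] then steps else [text]

-- ===== PORT B =====
-- continuation test for the inner two-pointer advance: nonempty and not a marker line
def pvCont (x : String) : Bool := !(x == "") && !pvIsNewStep x

def pvScanB (lines : List String) : List String :=
  match lines with
  | [] => []
  | l :: rest =>
    if l = "" then pvScanB rest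
    else PySem.Str.join " " (l :: rest.takeWhile pvCont) :: pvScanB (rest.dropWhile pvCont)
termination_by lines.length
decreasing_by
  · simp
  · exact Nat.lt_succ_of_le (List.dropWhile_sublist (l := rest) (p := pvCont)).length_le

def extract_cot_steps_py_alt (text : String) : List String :=
  let lines := (pvSplitNL text).map PySem.Str.strip
  let steps := pvScanB lines
  if steps ≠ [] then steps else [text]

-- ===== PRECONDITION & SPEC =====
def Spec_extract_cot_steps_py (text : String) (out : List String) : Prop := out = extract_cot_steps_py_alt text
instance (text : String) (out : List String) : Decidable (Spec_extract_cot_steps_py text out) := by unfold Spec_extract_cot_steps_py; infer_instance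

-- ===== CLAIM (what is proved, stated in full; the proofs are below) =====
def Claim_equal_extract_cot_steps_py : Prop := ∀ (text : String), Dom_extract_cot_steps_py text → Spec_extract_cot_steps_py text (extract_cot_steps_py text)

-- ===== LEMMAS AND PROOFS =====

-- A's loop body on an already-stripped line
def pvStepA' (acc : List String × List String) (line : String) : List String × List String :=
  if line = "" then
    (if acc.2 ≠ [] then (acc.1 ++ [PySem.Str.join " " acc.2], []) else acc)
  else if pvIsNewStep line ∧ acc.2 ≠ [] then
    (acc.1 ++ [PySem.Str.join " " acc.2], [line])
  else (acc.1, acc.2 ++ [line])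

-- main invariant: A's fold (with final flush) from any state equals B's segment scan
theorem pv_scan_eq (ls : List String) (steps cur : List String) :
    (let acc := ls.foldl pvStepA' (steps, cur);
     if acc.2 ≠ [] then acc.1 ++ [PySem.Str.join " " acc.2] else acc.1) =
    steps ++ (match cur with
      | [] => pvScanB ls
      | _ :: _ =>
        PySem.Str.join " " (cur ++ ls.takeWhile pvCont) :: pvScanB (ls.dropWhile pvCont)) := by
  induction ls generalizing steps cur with
  | nil =>
    cases cur <;> simp [pvScanB]
  | cons l rest ih =>
    by_cases hl : l = ""
    · subst hl
      cases cur with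
      | nil =>
        have hstep : pvStepA' (steps, []) "" = (steps, []) := by simp [pvStepA']
        rw [List.foldl_cons, hstep]
        simpa [pvScanB] using ih steps []
      | cons c cs =>
        have hstep : pvStepA' (steps, c :: cs) "" =
            (steps ++ [PySem.Str.join " " (c :: cs)], []) := by simp [pvStepA']
        rw [List.foldl_cons, hstep]
        simpa [pvScanB, pvCont] using ih (steps ++ [PySem.Str.join " " (c :: cs)]) []
    · by_cases hm : pvIsNewStep l = true
      · have hc : pvCont l = false := by simp [pvCont, hm]
        cases cur with
        | nil =>
          have hstep : pvStepA' (steps, []) l = (steps, [l]) := by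
            simp [pvStepA', hl]
          rw [List.foldl_cons, hstep]
          simpa [pvScanB, hl] using ih steps [l]
        | cons c cs =>
          have hstep : pvStepA' (steps, c :: cs) l =
              (steps ++ [PySem.Str.join " " (c :: cs)], [l]) := by
            simp [pvStepA', hl, hm]
          rw [List.foldl_cons, hstep]
          simpa [pvScanB, hl, List.takeWhile_cons, List.dropWhile_cons, hc]
            using ih (steps ++ [PySem.Str.join " " (c :: cs)]) [l]
      · have hc : pvCont l = true := by simp [pvCont, hm, hl]
        cases cur with
        | nil =>
          have hstep : pvStepA' (steps, []) l = (steps, [l]) := by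
            simp [pvStepA', hl]
          rw [List.foldl_cons, hstep]
          simpa [pvScanB, hl] using ih steps [l]
        | cons c cs =>
          have hstep : pvStepA' (steps, c :: cs) l = (steps, c :: cs ++ [l]) := by
            simp [pvStepA', hl, hm]
          rw [List.foldl_cons, hstep]
          simpa [List.takeWhile_cons, List.dropWhile_cons, hc]
            using ih steps (c :: cs ++ [l])

-- ===== VERDICT (by name: the statement is the Claim_ definition above) =====
theorem extract_cot_steps_py_spec : Claim_equal_extract_cot_steps_py := by
  intro text _
  unfold Spec_extract_cot_steps_py extract_cot_steps_py extract_cot_steps_py_alt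
  have hfold :
      (pvSplitNL text).foldl pvStepA ([], []) =
      ((pvSplitNL text).map PySem.Str.strip).foldl pvStepA' ([], []) := by
    rw [List.foldl_map]
    rfl
  simp only [hfold]
  have := pv_scan_eq ((pvSplitNL text).map PySem.Str.strip) [] []
  simp only at this
  simp [this]
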